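-- pv_equiv track=rewrite | github.com/Razor-87/hackerrank | python/easy/string_validators.py | string_validators
-- ===== SOURCE A (Python) =====
-- from typing import Tuple
--
-- def string_validators(string: str) -> Tuple[bool, ...]:
--     """
--     >>> string_validators('qA2')
--     (True, True, True, True, True)
--     >>> string_validators('123')
--     (True, False, True, False, False)
--     """
--     dict_methods = {
--         'isalnum': (char.isalnum() for char in string),
--         'isalpha': (char.isalpha() for char in string),
--         'isdigit': (char.isdigit() for char in string),
--         'islower': (char.islower() for char in string),
--         'isupper': (char.isupper() for char in string)
--     }
--     return tuple(map(any, dict_methods.values()))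
-- ===== SOURCE B (Python) =====
-- def string_validators(string):
--     alnum = alpha = digit = lower = upper = False
--     for c in string:
--         alnum = alnum or c.isalnum()
--         alpha = alpha or c.isalpha()
--         digit = digit or c.isdigit()
--         lower = lower or c.islower()
--         upper = upper or c.isupper()
--     return (alnum, alpha, digit, lower, upper)
-- ===== Notes on version B (the rewrite author's own statement) =====
-- stated objective: simpler
-- what changed: Replaces A's dict of five per-predicate generators consumed by map(any, ...) with a single pass that ORs five boolean flags across the characters.
import Mathlib
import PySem

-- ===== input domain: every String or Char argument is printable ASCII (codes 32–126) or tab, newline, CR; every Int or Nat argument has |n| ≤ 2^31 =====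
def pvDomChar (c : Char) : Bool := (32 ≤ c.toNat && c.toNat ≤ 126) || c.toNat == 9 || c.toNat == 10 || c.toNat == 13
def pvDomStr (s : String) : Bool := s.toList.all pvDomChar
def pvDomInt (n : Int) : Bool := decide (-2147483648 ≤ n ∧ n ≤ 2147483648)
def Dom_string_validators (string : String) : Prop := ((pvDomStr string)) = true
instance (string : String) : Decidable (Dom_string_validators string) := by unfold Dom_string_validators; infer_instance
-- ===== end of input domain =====

-- B makes one pass ORing five boolean flags instead of A's five per-predicate scans; objective: simpler.

-- ===== PORT A =====
-- A builds five generators (one per predicate) and applies any to each, i.e. five scans of the string.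
def string_validators (string : String) : List Bool :=
  [ string.toList.any PySem.Chars.isalnum,
    string.toList.any PySem.Chars.isalpha,
    string.toList.any PySem.Chars.isdigit,
    string.toList.any PySem.Chars.islower,
    string.toList.any PySem.Chars.isupper ]

-- ===== PORT B =====
-- one fold over the characters, accumulating the five flags
def string_validators_alt (string : String) : List Bool :=
  let r := string.toList.foldl
    (fun (st : Bool × Bool × Bool × Bool × Bool) c =>
      (st.1 || PySem.Chars.isalnum c,
       st.2.1 || PySem.Chars.isalpha c,
       st.2.2.1 || PySem.Chars.isdigit c,
       st.2.2.2.1 || PySem.Chars.islower c,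
       st.2.2.2.2 || PySem.Chars.isupper c))
    (false, false, false, false, false)
  [r.1, r.2.1, r.2.2.1, r.2.2.2.1, r.2.2.2.2]

-- ===== PRECONDITION & SPEC =====
def Spec_string_validators (string : String) (out : List Bool) : Prop := out = string_validators_alt string
instance (string : String) (out : List Bool) : Decidable (Spec_string_validators string out) := by unfold Spec_string_validators; infer_instance

-- ===== CLAIM (what is proved, stated in full; the proofs are below) =====
def Claim_equal_string_validators : Prop := ∀ (string : String), Dom_string_validators string → Spec_string_validators string (string_validators string)

-- ===== LEMMAS AND PROOFS =====
theorem sv_fold_eq (cs : List Char) (a b c d e : Bool) :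
    cs.foldl
      (fun (st : Bool × Bool × Bool × Bool × Bool) ch =>
        (st.1 || PySem.Chars.isalnum ch,
         st.2.1 || PySem.Chars.isalpha ch,
         st.2.2.1 || PySem.Chars.isdigit ch,
         st.2.2.2.1 || PySem.Chars.islower ch,
         st.2.2.2.2 || PySem.Chars.isupper ch))
      (a, b, c, d, e)
    = (a || cs.any PySem.Chars.isalnum,
       b || cs.any PySem.Chars.isalpha,
       c || cs.any PySem.Chars.isdigit,
       d || cs.any PySem.Chars.islower,
       e || cs.any PySem.Chars.isupper) := by
  induction cs generalizing a b c d e with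
  | nil => simp
  | cons x xs ih => simp [List.foldl, ih, Bool.or_assoc]

-- ===== VERDICT (by name: the statement is the Claim_ definition above) =====
theorem string_validators_spec : Claim_equal_string_validators := by
  intro s _
  unfold Spec_string_validators string_validators string_validators_alt
  simp [sv_fold_eq]
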